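-- pv_equiv track=rewrite | github.com/panpan0000/daocloud-ppt-skill | openclaw-skill/ppt-template-builder/src/index.py | _allocate_template_pages
-- ===== SOURCE A (Python) =====
-- from typing import Any
--
-- def _allocate_template_pages(
--     blocks: list[dict[str, Any]], render_strategy: str, allow_html_fallback: bool
-- ) -> tuple[list[int | None], list[int]]:
--     pools = {
--         "cover": [0],
--         "toc": [1],
--         "section": [2, 4, 16, 20, 40, 43],
--         "market_section": [20],
--         "content": [3, 6, 8, 9, 11, 12],
--         "matrix": [15],
--         "pie": [21, 22],
--         "bar": [23, 24, 25],
--         "line": [27, 26],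
--         "table": [28, 29, 30],
--         "slogan": [41, 42],
--         "end": [55],
--         "html": [3, 6, 8, 9],
--         "richtext": [3, 6, 8, 9],
--     }
--     used: set[int] = set()
--     allocations: list[int | None] = []
--     for block in blocks:
--         chosen = None
--         for candidate in pools.get(block.get("type", "content"), []):
--             if candidate not in used:
--                 chosen = candidate
--                 break
--         if chosen is not None:
--             used.add(chosen)
--             allocations.append(chosen)
--             continue
--         if render_strategy == "template_only" or not allow_html_fallback:
--             allocations.append(None)
--             continue
--         for candidate in pools["content"]:
--             if candidate not in used:
--                 used.add(candidate)
--                 chosen = candidate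
--                 break
--         allocations.append(chosen)
--     template_order: list[int] = []
--     for alloc in allocations:
--         if alloc is None or alloc in template_order:
--             continue
--         template_order.append(alloc)
--     return allocations, template_order
-- ===== SOURCE B (Python) =====
-- def _allocate_template_pages(blocks, render_strategy, allow_html_fallback):
--     # Different data structure: instead of a shared `used` set and per-block scans,
--     # keep shrinking per-type pools of still-available pages; the first available
--     # candidate is always the head of the remaining pool, and a page is removed
--     # from every pool the moment it is allocated. template_order is built inline.
--     remaining = {
--         "cover": [0],
--         "toc": [1],
--         "section": [2, 4, 16, 20, 40, 43],
--         "market_section": [20],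
--         "content": [3, 6, 8, 9, 11, 12],
--         "matrix": [15],
--         "pie": [21, 22],
--         "bar": [23, 24, 25],
--         "line": [27, 26],
--         "table": [28, 29, 30],
--         "slogan": [41, 42],
--         "end": [55],
--         "html": [3, 6, 8, 9],
--         "richtext": [3, 6, 8, 9],
--     }
--     allocations = []
--     template_order = []
--     for block in blocks:
--         pool = remaining.get(block.get("type", "content"), [])
--         if not pool and render_strategy != "template_only" and allow_html_fallback:
--             pool = remaining["content"]
--         if pool:
--             chosen = pool[0]
--             allocations.append(chosen)
--             template_order.append(chosen)
--             for lst in remaining.values():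
--                 if chosen in lst:
--                     lst.remove(chosen)
--         else:
--             allocations.append(None)
--     return allocations, template_order
-- ===== Notes on version B (the rewrite author's own statement) =====
-- stated objective: alternative
-- what changed: B replaces A's shared used-set plus per-block first-unused scans and a separate dedup pass with a different data structure: per-type pools of still-available pages that shrink as pages are allocated, so the choice is always the head of the remaining pool (no scan against used), the fallback test is just pool emptiness, and template_order is appended inline in the single pass.
import Mathlib
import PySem

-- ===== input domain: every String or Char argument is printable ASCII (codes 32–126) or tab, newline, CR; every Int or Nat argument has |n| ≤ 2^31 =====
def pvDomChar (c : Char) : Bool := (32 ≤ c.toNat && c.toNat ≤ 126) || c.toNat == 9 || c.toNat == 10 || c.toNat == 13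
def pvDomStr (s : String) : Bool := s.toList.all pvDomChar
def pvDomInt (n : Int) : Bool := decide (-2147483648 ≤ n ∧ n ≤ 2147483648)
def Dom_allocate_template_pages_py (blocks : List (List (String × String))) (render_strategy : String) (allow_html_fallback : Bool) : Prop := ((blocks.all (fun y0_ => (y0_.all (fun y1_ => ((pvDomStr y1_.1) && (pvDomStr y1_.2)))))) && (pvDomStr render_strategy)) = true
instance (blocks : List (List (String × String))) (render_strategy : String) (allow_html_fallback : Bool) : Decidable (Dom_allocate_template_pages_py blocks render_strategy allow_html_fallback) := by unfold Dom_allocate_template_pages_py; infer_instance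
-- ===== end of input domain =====

-- B replaces A's shared used-set, per-block first-unused scans and second dedup pass by
-- shrinking per-type pools of still-available pages (head pick, inline order); objective: alternative.

-- the `pools` literal of A (B starts from the same literal as its initial `remaining`)
def pvPools : PySem.Dict String (List Int) := PySem.Dict.mk [
  ("cover", [0]), ("toc", [1]), ("section", [2, 4, 16, 20, 40, 43]),
  ("market_section", [20]), ("content", [3, 6, 8, 9, 11, 12]), ("matrix", [15]),
  ("pie", [21, 22]), ("bar", [23, 24, 25]), ("line", [27, 26]),
  ("table", [28, 29, 30]), ("slogan", [41, 42]), ("end", [55]),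
  ("html", [3, 6, 8, 9]), ("richtext", [3, 6, 8, 9])]

-- ===== PORT A =====
-- A's inner `for candidate in …: if candidate not in used: chosen = candidate; break`
def pvScanPool (cands : List Int) (used : PySem.Set Int) : Option Int :=
  match cands with
  | [] => none
  | c :: rest => if PySem.Set.contains used c then pvScanPool rest used else some c

-- A's loop body over state (used, allocations)
def pvStepA (render_strategy : String) (allow_html_fallback : Bool)
    (st : PySem.Set Int × List (Option Int)) (block : List (String × String)) :
    PySem.Set Int × List (Option Int) :=
  match pvScanPool (pvPools.getD (PySem.Dict.getD (PySem.Dict.mk block) "type" "content") []) st.1 with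
  | some c => (PySem.Set.add st.1 c, st.2 ++ [some c])
  | none =>
    if render_strategy == "template_only" || !allow_html_fallback then
      (st.1, st.2 ++ [none])
    else
      -- pools["content"]: the key is present in the literal, so no KeyError
      match pvScanPool ((pvPools.get? "content").getD []) st.1 with
      | some c => (PySem.Set.add st.1 c, st.2 ++ [some c])
      | none => (st.1, st.2 ++ [none])

-- A's second loop building template_order
def pvBuildOrder (allocs : List (Option Int)) : List Int :=
  allocs.foldl (fun ord a =>
    match a with
    | none => ord
    | some x => if x ∈ ord then ord else ord ++ [x]) []

def allocate_template_pages_py (blocks : List (List (String × String))) (render_strategy : String) (allow_html_fallback : Bool) : List (Option Int) × List Int :=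
  let st := blocks.foldl (pvStepA render_strategy allow_html_fallback) (PySem.Set.empty, [])
  (st.2, pvBuildOrder st.2)

-- ===== PORT B =====
-- B's `if chosen in lst: lst.remove(chosen)` — remove the first occurrence if present
def pvRemove (lst : List Int) (c : Int) : List Int :=
  match lst with
  | [] => []
  | x :: rest => if x = c then rest else x :: pvRemove rest c

-- B's loop body over state (remaining, allocations, template_order)
def pvStepB (render_strategy : String) (allow_html_fallback : Bool)
    (st : PySem.Dict String (List Int) × List (Option Int) × List Int)
    (block : List (String × String)) :
    PySem.Dict String (List Int) × List (Option Int) × List Int :=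
  let pool := st.1.getD (PySem.Dict.getD (PySem.Dict.mk block) "type" "content") []
  let pool := if pool.isEmpty && !(render_strategy == "template_only") && allow_html_fallback
    then st.1.getD "content" [] else pool   -- remaining["content"]: key always present
  match pool with
  | [] => (st.1, st.2.1 ++ [none], st.2.2)
  | c :: _ =>
    (PySem.Dict.mk (st.1.items.map (fun p => (p.1, pvRemove p.2 c))),
     st.2.1 ++ [some c], st.2.2 ++ [c])

def allocate_template_pages_py_alt (blocks : List (List (String × String))) (render_strategy : String) (allow_html_fallback : Bool) : List (Option Int) × List Int :=
  let st := blocks.foldl (pvStepB render_strategy allow_html_fallback) (pvPools, [], [])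
  (st.2.1, st.2.2)

-- ===== PRECONDITION & SPEC =====
def Spec_allocate_template_pages_py (blocks : List (List (String × String))) (render_strategy : String) (allow_html_fallback : Bool) (out : List (Option Int) × List Int) : Prop := out = allocate_template_pages_py_alt blocks render_strategy allow_html_fallback
instance (blocks : List (List (String × String))) (render_strategy : String) (allow_html_fallback : Bool) (out : List (Option Int) × List Int) : Decidable (Spec_allocate_template_pages_py blocks render_strategy allow_html_fallback out) := by unfold Spec_allocate_template_pages_py; infer_instance

-- ===== CLAIM (what is proved, stated in full; the proofs are below) =====
def Claim_equal_allocate_template_pages_py : Prop := ∀ (blocks : List (List (String × String))) (render_strategy : String) (allow_html_fallback : Bool), Dom_allocate_template_pages_py blocks render_strategy allow_html_fallback → Spec_allocate_template_pages_py blocks render_strategy allow_html_fallback (allocate_template_pages_py blocks render_strategy allow_html_fallback)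

-- ===== LEMMAS AND PROOFS =====

-- A's break loop is the head of the not-yet-used sublist
theorem pvScanPool_eq_head? (cands : List Int) (used : PySem.Set Int) :
    pvScanPool cands used
      = (cands.filter (fun c => !(PySem.Set.contains used c))).head? := by
  induction cands with
  | nil => rfl
  | cons c rest ih =>
    by_cases h : c ∈ used <;>
      simp [pvScanPool, List.filter_cons, PySem.Set.contains, h, ih]

-- a value found by a scan was not yet used
theorem pvScanPool_not_mem (cands : List Int) (used : PySem.Set Int) (c : Int)
    (hc : pvScanPool cands used = some c) : c ∉ used := by
  induction cands with
  | nil => simp [pvScanPool] at hc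
  | cons d rest ih =>
    by_cases hd : d ∈ used
    · exact ih (by simpa [pvScanPool, PySem.Set.contains, hd] using hc)
    · have : d = c := by simpa [pvScanPool, PySem.Set.contains, hd] using hc
      exact this ▸ hd

theorem pvRemove_of_nodup (lst : List Int) (c : Int) (h : lst.Nodup) :
    pvRemove lst c = lst.filter (fun x => x ≠ c) := by
  induction lst with
  | nil => rfl
  | cons x rest ih =>
    rcases List.nodup_cons.mp h with ⟨hx, hrest⟩
    by_cases hxc : x = c
    · subst hxc
      simp only [pvRemove, if_pos rfl, List.filter_cons]
      simp only [ne_eq, not_true_eq_false, decide_false, Bool.false_eq_true, if_false]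
      exact (List.filter_eq_self.mpr (fun a ha => by
        simp only [ne_eq, decide_eq_true_eq]
        exact fun e => hx (e ▸ ha))).symm
    · simp [pvRemove, hxc, List.filter_cons, ih hrest]

theorem pvBuildOrder_append_none (al : List (Option Int)) :
    pvBuildOrder (al ++ [none]) = pvBuildOrder al := by
  simp [pvBuildOrder, List.foldl_append]

theorem pvBuildOrder_append_some (al : List (Option Int)) (c : Int) :
    pvBuildOrder (al ++ [some c]) =
      if c ∈ pvBuildOrder al then pvBuildOrder al else pvBuildOrder al ++ [c] := by
  simp [pvBuildOrder, List.foldl_append]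

theorem mem_foldlOrder (al : List (Option Int)) (ord : List Int) (x : Int) :
    x ∈ al.foldl (fun ord a =>
      match a with
      | none => ord
      | some y => if y ∈ ord then ord else ord ++ [y]) ord ↔ x ∈ ord ∨ some x ∈ al := by
  induction al generalizing ord with
  | nil => simp
  | cons a rest ih =>
    cases a with
    | none => simp [List.foldl_cons, ih]
    | some y =>
      by_cases h : y ∈ ord
      · simp only [List.foldl_cons, if_pos h, ih, List.mem_cons]
        constructor
        · rintro (hx | hx)
          · exact Or.inl hx
          · exact Or.inr (Or.inr hx)
        · rintro (hx | hx | hx)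
          · exact Or.inl hx
          · exact Or.inl (Option.some.inj hx ▸ h)
          · exact Or.inr hx
      · simp only [List.foldl_cons, if_neg h, ih, List.mem_append, List.mem_cons,
          Option.some.injEq, List.not_mem_nil, or_false]
        tauto

theorem mem_pvBuildOrder (al : List (Option Int)) (x : Int) :
    x ∈ pvBuildOrder al ↔ some x ∈ al := by
  simpa using mem_foldlOrder al [] x

-- get? on a dict whose values were mapped
theorem get?_mk_map (l : List (String × List Int)) (f : List Int → List Int) (k : String) :
    (PySem.Dict.mk (l.map (fun p => (p.1, f p.2)))).get? k
      = ((PySem.Dict.mk l).get? k).map f := by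
  induction l with
  | nil => simp [PySem.Dict.get?]
  | cons p rest ih =>
    obtain ⟨pk, pv⟩ := p
    by_cases h : (pk == k) = true <;>
      simp [PySem.Dict.get?_mk_cons, h, ih]

theorem getD_mk_map (l : List (String × List Int)) (f : List Int → List Int)
    (hf : f [] = []) (k : String) :
    (PySem.Dict.mk (l.map (fun p => (p.1, f p.2)))).getD k []
      = f ((PySem.Dict.mk l).getD k []) := by
  rw [PySem.Dict.getD_eq_get?_getD, PySem.Dict.getD_eq_get?_getD, get?_mk_map]
  cases (PySem.Dict.mk l).get? k with
  | none => simp [hf]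
  | some v => simp

-- the filtered-pools view of B's remaining dict
def pvFiltered (used : PySem.Set Int) : PySem.Dict String (List Int) :=
  PySem.Dict.mk (pvPools.items.map (fun p => (p.1, p.2.filter (fun c => !(PySem.Set.contains used c)))))

theorem getD_pvFiltered (used : PySem.Set Int) (k : String) :
    (pvFiltered used).getD k []
      = (pvPools.getD k []).filter (fun c => !(PySem.Set.contains used c)) := by
  exact getD_mk_map pvPools.items _ rfl k

theorem pvPools_values_nodup :
    ∀ p ∈ pvPools.items, (p.2 : List Int).Nodup := by decide

-- removing a fresh allocation from every filtered pool = filtering against the grown set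
theorem pvFiltered_remove (used : PySem.Set Int) (c : Int) (hc : c ∉ used) :
    PySem.Dict.mk ((pvFiltered used).items.map (fun p => (p.1, pvRemove p.2 c)))
      = pvFiltered (PySem.Set.add used c) := by
  unfold pvFiltered
  congr 1
  simp only [List.map_map]
  apply List.map_congr_left
  intro p hp
  simp only [Function.comp]
  congr 1
  rw [pvRemove_of_nodup _ _ ((pvPools_values_nodup p hp).filter _), List.filter_filter]
  apply List.filter_congr
  intro x _
  by_cases hxc : x = c
  · subst hxc
    simp [PySem.Set.contains, PySem.Set.mem_add]
  · by_cases hx : x ∈ used <;>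
      simp [PySem.Set.contains, PySem.Set.mem_add, hx, hxc]

-- the invariant carried through the fold
def pvRel (sa : PySem.Set Int × List (Option Int))
    (sb : PySem.Dict String (List Int) × List (Option Int) × List Int) : Prop :=
  sb.1 = pvFiltered sa.1 ∧ sb.2.1 = sa.2 ∧ sb.2.2 = pvBuildOrder sa.2 ∧
    (∀ x : Int, some x ∈ sa.2 → x ∈ sa.1)

theorem pvRel_step (render_strategy : String) (allow_html_fallback : Bool)
    (sa : PySem.Set Int × List (Option Int))
    (sb : PySem.Dict String (List Int) × List (Option Int) × List Int)
    (h : pvRel sa sb) (block : List (String × String)) :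
    pvRel (pvStepA render_strategy allow_html_fallback sa block)
      (pvStepB render_strategy allow_html_fallback sb block) := by
  obtain ⟨hrem, hal, hord, hinv⟩ := h
  have step_some : ∀ c : Int, c ∉ sa.1 →
      pvRel (PySem.Set.add sa.1 c, sa.2 ++ [some c])
        (PySem.Dict.mk ((pvFiltered sa.1).items.map (fun p => (p.1, pvRemove p.2 c))),
         sa.2 ++ [some c], pvBuildOrder sa.2 ++ [c]) := by
    intro c hc
    refine ⟨pvFiltered_remove sa.1 c hc, rfl, ?_, ?_⟩
    · rw [pvBuildOrder_append_some]
      have : c ∉ pvBuildOrder sa.2 := fun hm => hc (hinv c ((mem_pvBuildOrder _ _).mp hm))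
      simp [this]
    · intro x hx
      rcases List.mem_append.mp hx with hx | hx
      · exact (PySem.Set.mem_add _ _ _).mpr (Or.inl (hinv x hx))
      · exact (PySem.Set.mem_add _ _ _).mpr (Or.inr (Option.some.inj (List.mem_singleton.mp hx)))
  have step_none :
      pvRel (sa.1, sa.2 ++ [none]) (pvFiltered sa.1, sa.2 ++ [none], pvBuildOrder sa.2) := by
    refine ⟨rfl, rfl, ?_, ?_⟩
    · rw [pvBuildOrder_append_none]
    · intro x hx
      rcases List.mem_append.mp hx with hx | hx
      · exact hinv x hx
      · simp at hx
  unfold pvStepA pvStepB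
  rw [hrem, hal, hord]
  simp only [getD_pvFiltered]
  set t := PySem.Dict.getD (PySem.Dict.mk block) "type" "content" with ht
  cases hfst : pvScanPool (pvPools.getD t []) sa.1 with
  | some c =>
    have hb : ((pvPools.getD t []).filter (fun c => !(PySem.Set.contains sa.1 c))).head? = some c := by
      rw [← pvScanPool_eq_head?]; exact hfst
    rcases hhd : (pvPools.getD t []).filter (fun c => !(PySem.Set.contains sa.1 c)) with _ | ⟨c', rest'⟩
    · rw [hhd] at hb; simp at hb
    · have hc' : c' = c := by rw [hhd] at hb; simpa using hb
      rw [hc']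
      simp only [List.isEmpty_cons, Bool.false_and, Bool.false_eq_true, if_false]
      exact step_some c (pvScanPool_not_mem _ _ _ hfst)
  | none =>
    have hb : (pvPools.getD t []).filter (fun c => !(PySem.Set.contains sa.1 c)) = [] := by
      have := pvScanPool_eq_head? (pvPools.getD t []) sa.1
      rw [hfst] at this
      exact List.head?_eq_none_iff.mp this.symm
    rw [hb]
    by_cases hcond : (render_strategy == "template_only" || !allow_html_fallback) = true
    · have : (List.isEmpty ([] : List Int) && !(render_strategy == "template_only") && allow_html_fallback) = false := by
        rcases Bool.or_eq_true_iff.mp hcond with h1 | h1 <;> simp [h1] <;>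
          cases allow_html_fallback <;> simp_all
      simp only [hcond, if_true, this, Bool.false_eq_true, if_false]
      exact step_none
    · have hrs : (render_strategy == "template_only") = false := by
        cases h1 : (render_strategy == "template_only") <;> simp_all
      have hah : allow_html_fallback = true := by
        cases allow_html_fallback <;> simp_all
      have hcontent : (pvPools.get? "content").getD [] = pvPools.getD "content" [] :=
        (PySem.Dict.getD_eq_get?_getD _ _ _).symm
      simp only [hcond, Bool.false_eq_true, if_false, List.isEmpty_nil, hrs, hah,
        Bool.not_false, Bool.and_true, Bool.and_self, if_true]
      cases hsnd : pvScanPool ((pvPools.get? "content").getD []) sa.1 with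
      | some c =>
        have hb2 : ((pvPools.getD "content" []).filter (fun c => !(PySem.Set.contains sa.1 c))).head? = some c := by
          rw [← pvScanPool_eq_head?, ← hcontent]; exact hsnd
        rcases hhd : (pvPools.getD "content" []).filter (fun c => !(PySem.Set.contains sa.1 c)) with _ | ⟨c', rest'⟩
        · rw [hhd] at hb2; simp at hb2
        · have hc' : c' = c := by rw [hhd] at hb2; simpa using hb2
          rw [hc']
          exact step_some c (pvScanPool_not_mem _ _ _ hsnd)
      | none =>
        have hb2 : (pvPools.getD "content" []).filter (fun c => !(PySem.Set.contains sa.1 c)) = [] := by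
          have := pvScanPool_eq_head? ((pvPools.get? "content").getD []) sa.1
          rw [hsnd, hcontent] at this
          exact List.head?_eq_none_iff.mp this.symm
        rw [hb2]
        exact step_none

theorem pvRel_foldl (blocks : List (List (String × String)))
    (render_strategy : String) (allow_html_fallback : Bool)
    (sa : PySem.Set Int × List (Option Int))
    (sb : PySem.Dict String (List Int) × List (Option Int) × List Int) (h : pvRel sa sb) :
    pvRel (blocks.foldl (pvStepA render_strategy allow_html_fallback) sa)
      (blocks.foldl (pvStepB render_strategy allow_html_fallback) sb) := by
  induction blocks generalizing sa sb with
  | nil => exact h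
  | cons b rest ih => exact ih _ _ (pvRel_step _ _ _ _ h b)

theorem pvFiltered_empty : pvFiltered PySem.Set.empty = pvPools := by decide

-- ===== VERDICT (by name: the statement is the Claim_ definition above) =====
theorem allocate_template_pages_py_spec : Claim_equal_allocate_template_pages_py := by
  intro blocks render_strategy allow_html_fallback _
  simp only [Spec_allocate_template_pages_py, allocate_template_pages_py,
    allocate_template_pages_py_alt]
  have h := pvRel_foldl blocks render_strategy allow_html_fallback
    (PySem.Set.empty, []) (pvPools, [], [])
    ⟨pvFiltered_empty.symm, rfl, rfl, by intro x hx; simp at hx⟩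
  obtain ⟨_, hal, hord, _⟩ := h
  rw [hal, hord]
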